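-- pv_equiv track=rewrite | github.com/Maminiaina-Rakotovao/PythonChallenges | remove_all_before.py | Removeall_before
-- ===== SOURCE A (Python) =====
-- def Removeall_before(items,border):
-- 	if border not in items:
-- 		return items
-- 	else:
-- 		get_index_item = items.index(border)
-- 		for i in range(get_index_item):
-- 			del items[0];
-- 		return items
-- ===== SOURCE B (Python) =====
-- def Removeall_before(items, border):
--     result = []
--     seen = False
--     for x in items:
--         if not seen and x == border:
--             seen = True
--         if seen:
--             result.append(x)
--     if seen:
--         items[:] = result
--     return items
-- ===== Notes on version B (the rewrite author's own statement) =====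
-- stated objective: alternative
-- what changed: Replaces the membership test + index() + repeated del items[0] (each a front-shift) with a single forward pass using a boolean flag that starts accumulating at the first border occurrence, committed via slice assignment to preserve in-place mutation.
import Mathlib
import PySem

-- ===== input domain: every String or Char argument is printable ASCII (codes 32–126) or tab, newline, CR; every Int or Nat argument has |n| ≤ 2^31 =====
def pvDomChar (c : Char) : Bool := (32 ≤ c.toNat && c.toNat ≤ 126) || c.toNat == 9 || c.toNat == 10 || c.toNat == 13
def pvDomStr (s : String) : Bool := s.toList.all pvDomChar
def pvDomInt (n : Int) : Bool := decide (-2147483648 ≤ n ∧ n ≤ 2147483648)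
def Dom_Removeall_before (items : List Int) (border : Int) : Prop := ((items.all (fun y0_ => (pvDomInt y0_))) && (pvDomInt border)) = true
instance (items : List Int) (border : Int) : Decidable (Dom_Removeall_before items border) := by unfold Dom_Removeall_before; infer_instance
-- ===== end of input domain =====

-- ===== PORT A =====
-- Port of A: membership test, then items.index(border), then that many `del items[0]`.
def Removeall_before (items : List Int) (border : Int) : List Int :=
  if ¬ border ∈ items then items
  else
    match PySem.List.index? items border with
    | none => items
    | some get_index_item =>
      (PySem.List.pyRange 0 (Int.ofNat get_index_item) 1).foldl (fun acc _ => acc.drop 1) items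

-- ===== PORT B =====
-- One step of B's loop body: flip the flag at the first border, append once it is set.
def altStep (border : Int) (st : Bool × List Int) (x : Int) : Bool × List Int :=
  let seen := if !st.1 && x == border then true else st.1
  if seen then (seen, st.2 ++ [x]) else (seen, st.2)

-- Port of B: one pass with a (seen, result) state; items unchanged if border never seen.
-- (In Python B commits via items[:] = result; only the RETURN value is modelled here.)
def Removeall_before_alt (items : List Int) (border : Int) : List Int :=
  let st := items.foldl (altStep border) (false, [])
  if st.1 then st.2 else items

-- ===== PRECONDITION & SPEC =====
def Spec_Removeall_before (items : List Int) (border : Int) (out : List Int) : Prop := out = Removeall_before_alt items border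
instance (items : List Int) (border : Int) (out : List Int) : Decidable (Spec_Removeall_before items border out) := by unfold Spec_Removeall_before; infer_instance

-- ===== CLAIM (what is proved, stated in full; the proofs are below) =====
def Claim_equal_Removeall_before : Prop := ∀ (items : List Int) (border : Int), Dom_Removeall_before items border → Spec_Removeall_before items border (Removeall_before items border)

-- ===== LEMMAS AND PROOFS =====

theorem altStep_true (border : Int) (acc : List Int) (x : Int) :
    altStep border (true, acc) x = (true, acc ++ [x]) := by
  simp [altStep]

theorem altStep_false_ne (border : Int) (acc : List Int) (x : Int) (hx : x ≠ border) :
    altStep border (false, acc) x = (false, acc) := by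
  simp [altStep, hx]

theorem altStep_false_self (border : Int) (acc : List Int) :
    altStep border (false, acc) border = (true, acc ++ [border]) := by
  simp [altStep]

theorem foldl_altStep_true (border : Int) (xs acc : List Int) :
    xs.foldl (altStep border) (true, acc) = (true, acc ++ xs) := by
  induction xs generalizing acc with
  | nil => simp
  | cons y ys ih =>
    rw [List.foldl_cons, altStep_true, ih, List.append_assoc]
    rfl

theorem foldl_altStep_false (border : Int) (xs acc : List Int) (h : border ∉ xs) :
    xs.foldl (altStep border) (false, acc) = (false, acc) := by
  induction xs with
  | nil => simp
  | cons y ys ih =>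
    have hy : y ≠ border := fun hh => h (hh ▸ List.mem_cons_self)
    rw [List.foldl_cons, altStep_false_ne border acc y hy,
      ih (fun hh => h (List.mem_cons_of_mem _ hh))]

theorem foldl_drop (L : List Int) (l : List Int) :
    L.foldl (fun acc _ => acc.drop 1) l = l.drop L.length := by
  induction L generalizing l with
  | nil => rw [List.foldl_nil, List.length_nil, List.drop_zero]
  | cons a t ih =>
    rw [List.foldl_cons, ih, List.drop_drop, List.length_cons, Nat.add_comm]

theorem main_eq (items : List Int) (border : Int) :
    Removeall_before items border = Removeall_before_alt items border := by
  by_cases hmem : border ∈ items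
  · obtain ⟨k, hk⟩ := Option.isSome_iff_exists.mp
      ((PySem.List.index?_isSome_iff items border).mpr hmem)
    obtain ⟨pre, suf, hsplit, hlen, hnp⟩ := (PySem.List.index?_eq_some_iff items border k).mp hk
    have hA : Removeall_before items border = items.drop k := by
      unfold Removeall_before
      rw [if_neg (by simpa using hmem), hk]
      show (PySem.List.pyRange 0 (Int.ofNat k) 1).foldl (fun acc _ => acc.drop 1) items
        = items.drop k
      rw [foldl_drop, PySem.List.length_pyRange_one]
      simp
    have hB : Removeall_before_alt items border = border :: suf := by
      unfold Removeall_before_alt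
      rw [hsplit, List.foldl_append, foldl_altStep_false border pre [] hnp,
        List.foldl_cons, altStep_false_self, foldl_altStep_true]
      simp
    rw [hA, hB, hsplit, ← hlen]
    rw [List.drop_append_of_le_length (le_refl pre.length)]
    simp
  · unfold Removeall_before Removeall_before_alt
    rw [if_pos (by simpa using hmem), foldl_altStep_false border items [] hmem]
    rfl

-- ===== VERDICT (by name: the statement is the Claim_ definition above) =====
theorem Removeall_before_spec : Claim_equal_Removeall_before := by
  intro items border _
  unfold Spec_Removeall_before
  exact main_eq items border
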